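-- pv_equiv track=rewrite | github.com/cyberanalyst86/Malicious-URL-classifier | featured/url_features_extraction.py | get_sub_directory_special_count
-- ===== SOURCE A (Python) =====
-- def get_sub_directory_special_count(sub_directory):
--     count = 0
--
--     delim = ['-', '.', '_', '~', ':', '/', '?', '#', '[', ']', '@', '!', '$', '&', '(', ')', '*', '+', ',', ';', '=',
--              '`']
--     sub_path = sub_directory.strip("/")
--
--     for lim in delim:
--         if lim in sub_path:
--             count = count + sub_path.count(lim)
--
--     return count
-- ===== SOURCE B (Python) =====
-- DELIMS = frozenset('-._~:/?#[]@!$&()*+,;=`')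
--
-- def get_sub_directory_special_count(sub_directory):
--     return sum(1 for c in sub_directory.strip("/") if c in DELIMS)
-- ===== Notes on version B (the rewrite author's own statement) =====
-- stated objective: simpler
-- what changed: Replaced A's per-delimiter loop of substring scans (an 'in' test plus a .count pass per delimiter) by a single one-line pass over the stripped string counting characters that belong to a frozenset of the 22 delimiters.
import Mathlib
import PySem

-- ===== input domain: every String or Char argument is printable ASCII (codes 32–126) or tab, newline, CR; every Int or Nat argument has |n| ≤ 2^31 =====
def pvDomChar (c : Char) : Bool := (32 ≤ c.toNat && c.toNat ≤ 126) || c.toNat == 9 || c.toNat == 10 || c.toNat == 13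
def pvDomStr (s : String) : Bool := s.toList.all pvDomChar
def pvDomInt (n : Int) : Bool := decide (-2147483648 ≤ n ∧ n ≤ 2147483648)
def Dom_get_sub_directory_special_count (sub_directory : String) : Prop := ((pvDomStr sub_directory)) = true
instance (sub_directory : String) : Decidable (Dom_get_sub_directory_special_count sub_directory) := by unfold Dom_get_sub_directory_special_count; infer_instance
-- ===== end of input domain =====

-- B replaces A's 22 per-delimiter substring scans by a single pass over the stripped
-- string counting characters that belong to a set of the delimiters (objective: simpler).

-- ===== PORT A =====
def get_sub_directory_special_count (sub_directory : String) : Int :=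
  let count : Int := 0
  let delim : List String := ["-", ".", "_", "~", ":", "/", "?", "#", "[", "]", "@", "!",
    "$", "&", "(", ")", "*", "+", ",", ";", "=", "`"]
  let sub_path := PySem.Str.stripChars sub_directory "/"
  delim.foldl
    (fun count lim =>
      if PySem.Str.isIn lim sub_path then count + (PySem.Str.count sub_path lim : Int)
      else count)
    count

-- ===== PORT B =====
-- the frozenset DELIMS of Source B (22 distinct characters)
def pvDelims : List Char := "-._~:/?#[]@!$&()*+,;=`".toList

def get_sub_directory_special_count_alt (sub_directory : String) : Int :=
  -- sum(1 for c in sub_directory.strip("/") if c in DELIMS)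
  ((PySem.Str.stripChars sub_directory "/").toList.countP (fun c => pvDelims.contains c) : Int)

-- ===== PRECONDITION & SPEC =====
def Spec_get_sub_directory_special_count (sub_directory : String) (out : Int) : Prop := out = get_sub_directory_special_count_alt sub_directory
instance (sub_directory : String) (out : Int) : Decidable (Spec_get_sub_directory_special_count sub_directory out) := by unfold Spec_get_sub_directory_special_count; infer_instance

-- ===== CLAIM (what is proved, stated in full; the proofs are below) =====
def Claim_equal_get_sub_directory_special_count : Prop := ∀ (sub_directory : String), Dom_get_sub_directory_special_count sub_directory → Spec_get_sub_directory_special_count sub_directory (get_sub_directory_special_count sub_directory)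

-- ===== LEMMAS AND PROOFS =====

-- Chars.count with a single-character needle is List.count (fuel recursion unrolled).
theorem pv_go_singleton (c : Char) : ∀ (fuel : Nat) (l : List Char) (acc : Nat),
    l.length ≤ fuel → PySem.Chars.count.go [c] fuel l acc = acc + l.count c := by
  intro fuel
  induction fuel with
  | zero =>
    intro l acc h
    have : l = [] := List.eq_nil_of_length_eq_zero (Nat.le_zero.mp h)
    subst this; simp [PySem.Chars.count.go]
  | succ n ih =>
    intro l acc h
    cases l with
    | nil => simp [PySem.Chars.count.go]
    | cons x t =>
      simp only [List.length_cons] at h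
      have ht : t.length ≤ n := by omega
      simp only [PySem.Chars.count.go, List.isPrefixOf, List.length_singleton, List.drop_one,
        List.tail_cons]
      by_cases hx : c = x
      · subst hx
        simp only [BEq.rfl, Bool.true_and, if_pos]
        rw [ih t (acc + 1) ht]
        simp
        omega
      · have hb : (c == x) = false := by simp [hx]
        simp only [hb, Bool.false_and, Bool.false_eq_true, if_false]
        rw [ih t acc ht]
        simp [List.count_cons]
        exact fun h => hx h.symm

theorem pv_count_singleton (c : Char) (t : List Char) :
    PySem.Chars.count t [c] = t.count c := by
  simp only [PySem.Chars.count, List.isEmpty, Bool.false_eq_true, if_false]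
  rw [pv_go_singleton c t.length t 0 (le_refl _)]
  omega

-- if the character does not occur, its count is 0, so A's membership guard can be dropped
theorem pv_guard_step (t : List Char) (acc : Int) (c : Char) :
    (if PySem.Chars.isIn [c] t then acc + (PySem.Chars.count t [c] : Int) else acc)
      = acc + (t.count c : Int) := by
  by_cases h : PySem.Chars.isIn [c] t = true
  · simp [h, pv_count_singleton]
  · have hf : PySem.Chars.isIn [c] t = false := Bool.eq_false_iff.mpr h
    have h0 : t.count c = 0 := by
      rw [PySem.Chars.isIn_eq_false_iff] at hf
      rw [List.count_eq_zero]
      exact fun hc => hf ((List.singleton_infix_iff c t).mpr hc)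
    simp [hf, h0]

theorem pv_countP_cons (d : Char) (ds : List Char) (hd : d ∉ ds) (t : List Char) :
    t.countP (fun c => decide (c ∈ d :: ds)) = t.count d + t.countP (fun c => decide (c ∈ ds)) := by
  induction t with
  | nil => simp
  | cons x t ih =>
    simp only [List.countP_cons, List.count_cons, ih]
    by_cases hx : x = d
    · subst hx
      simp [hd]
      omega
    · simp [hx]
      omega

-- summing per-character counts over a duplicate-free list of characters is one countP pass
theorem pv_sum_counts (t : List Char) : ∀ (ds : List Char), ds.Nodup →
    ds.foldl (fun (acc : Int) c => acc + (t.count c : Int)) 0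
      = (t.countP (fun c => ds.contains c) : Int) := by
  intro ds
  induction ds with
  | nil => simp
  | cons d ds ih =>
    intro hn
    rw [List.foldl_cons, PySem.List.foldl_add]
    rw [PySem.List.foldl_add] at ih
    have hnd := List.nodup_cons.mp hn
    have h2 := ih hnd.2
    simp only [List.contains_eq_mem] at *
    rw [pv_countP_cons d ds hnd.1 t]
    push_cast at *
    omega

-- ===== VERDICT (by name: the statement is the Claim_ definition above) =====
theorem get_sub_directory_special_count_spec : Claim_equal_get_sub_directory_special_count := by
  intro s _
  unfold Spec_get_sub_directory_special_count
  unfold get_sub_directory_special_count get_sub_directory_special_count_alt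
  rw [show (["-", ".", "_", "~", ":", "/", "?", "#", "[", "]", "@", "!",
    "$", "&", "(", ")", "*", "+", ",", ";", "=", "`"] : List String)
      = pvDelims.map (fun c => String.ofList [c]) from rfl]
  rw [List.foldl_map]
  simp only [PySem.Str.isIn_eq, PySem.Str.count_eq, String.toList_ofList]
  simp only [pv_guard_step]
  rw [pv_sum_counts ((PySem.Str.stripChars s "/").toList) pvDelims (by decide)]
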